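-- pv_equiv track=rewrite | github.com/yezyvibe/Algorithm_PS | 실력확인/nc1.py | solution
-- ===== SOURCE A (Python) =====
-- def solution(source):
--     dest = ''
--     while source != '':
--         removal = []
--         new_source = []
--         for i in range(len(source)):
--             cur = source[i]
--             if cur in removal:
--                 new_source.append(cur)
--             else:
--                 removal.append(cur)
--         removal.sort()
--         dest += "".join(removal)
--         source = "".join(new_source)
--     return dest
-- ===== SOURCE B (Python) =====
-- def solution(source):
--     counts = {}
--     for c in source:
--         counts[c] = counts.get(c, 0) + 1
--     out = []
--     if counts:
--         m = max(counts.values())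
--         for k in range(1, m + 1):
--             out.extend(sorted(c for c, n in counts.items() if n >= k))
--     return ''.join(out)
-- ===== Notes on version B (the rewrite author's own statement) =====
-- stated objective: faster
-- what changed: A repeatedly strips the first occurrence of each distinct char and rescans the shrinking string (with a linear 'in removal' scan inside); B counts frequencies once and emits, for each level k=1..maxcount, the sorted chars occurring at least k times.
import Mathlib
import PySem

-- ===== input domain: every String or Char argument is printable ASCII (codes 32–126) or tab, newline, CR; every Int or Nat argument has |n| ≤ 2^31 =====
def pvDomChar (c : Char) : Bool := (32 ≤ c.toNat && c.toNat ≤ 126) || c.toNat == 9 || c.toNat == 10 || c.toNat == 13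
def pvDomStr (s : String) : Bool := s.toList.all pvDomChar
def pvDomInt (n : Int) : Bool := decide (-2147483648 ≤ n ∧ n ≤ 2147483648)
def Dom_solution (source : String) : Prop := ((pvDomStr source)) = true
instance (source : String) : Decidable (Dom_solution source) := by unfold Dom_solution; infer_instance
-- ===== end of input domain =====

-- B replaces A's repeated strip-the-first-occurrences-and-rescan passes by one frequency
-- count: level k of the output is the sorted chars occurring at least k times (objective: faster).

-- ===== PORT A =====
-- one pass of A's while-body: for i in range(len(source)): split into removal / new_source
def pvPassA (s : List Char) : List Char × List Char :=
  (PySem.List.pyRange 0 (s.length : Int) 1).foldl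
    (fun st i =>
      let cur := PySem.List.pyGetD s i ' '
      if st.1.contains cur then (st.1, st.2 ++ [cur]) else (st.1 ++ [cur], st.2))
    ([], [])

-- the step of pvPassA as a fold over the characters themselves (used for termination below)
def pvStep (st : List Char × List Char) (c : Char) : List Char × List Char :=
  if st.1.contains c then (st.1, st.2 ++ [c]) else (st.1 ++ [c], st.2)

theorem pvPassA_eq_foldl (s : List Char) : pvPassA s = s.foldl pvStep ([], []) :=
  PySem.List.foldl_pyRange_zero_pyGetD' s ' ' pvStep ([], [])

theorem pvStep_foldl_fst (s : List Char) (rem ns : List Char) :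
    (s.foldl pvStep (rem, ns)).1 = PySem.Set.update rem s := by
  induction s generalizing rem ns with
  | nil => rfl
  | cons a t ih =>
      by_cases ha : rem.contains a = true <;>
        simp only [List.foldl_cons, pvStep, PySem.Set.update_cons, PySem.Set.add,
          PySem.Set.contains_eq_listContains, ha, if_true, if_false, Bool.false_eq_true] <;>
        exact ih _ _

theorem pvStep_foldl_len (s : List Char) (rem ns : List Char) :
    (s.foldl pvStep (rem, ns)).1.length + (s.foldl pvStep (rem, ns)).2.length
      = rem.length + ns.length + s.length := by
  induction s generalizing rem ns with
  | nil => simp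
  | cons a t ih =>
      by_cases ha : rem.contains a = true <;>
        simp only [List.foldl_cons, pvStep, ha, if_true, if_false, Bool.false_eq_true] <;>
        rw [ih] <;> simp <;> omega

theorem pvPassA_snd_length (s : List Char) (h : s ≠ []) :
    (pvPassA s).2.length < s.length := by
  have hl := pvStep_foldl_len s [] []
  have hf := pvStep_foldl_fst s [] []
  rw [pvPassA_eq_foldl]
  rw [PySem.Set.update_nil_left] at hf
  have : (PySem.Set.ofList s).length ≠ 0 := by
    cases s with
    | nil => exact absurd rfl h
    | cons a t =>
        intro hz
        have : a ∈ PySem.Set.ofList (a :: t) := by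
          rw [PySem.Set.mem_ofList]; exact List.mem_cons_self
        rw [List.length_eq_zero_iff] at hz
        simp [hz] at this
  rw [hf] at hl
  simp only [List.length_nil] at hl
  omega

def pvALoop (s : List Char) (dest : List Char) : List Char :=
  if h : s = [] then dest
  else
    let st := pvPassA s
    pvALoop st.2 (dest ++ PySem.List.sorted st.1 (fun c => c) false)
termination_by s.length
decreasing_by exact pvPassA_snd_length s h

def solution (source : String) : String := String.mk (pvALoop source.toList [])

-- ===== PORT B =====
-- counts[c] = counts.get(c, 0) + 1 over the string
def pvCounts (s : List Char) : PySem.Dict Char Int :=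
  s.foldl (fun d c => d.insert c (d.getD c 0 + 1)) PySem.Dict.empty

-- the output characters: if counts is nonempty, for k in range(1, max+1) emit sorted chars with count ≥ k
def pvBlist (s : List Char) : List Char :=
  match PySem.List.max? (pvCounts s).values (fun v => v) with
  | none => []
  | some m =>
      (PySem.List.pyRange 1 (m + 1) 1).foldl
        (fun acc k =>
          acc ++ PySem.List.sorted (((pvCounts s).items.filter (fun p => decide (k ≤ p.2))).map (·.1))
            (fun c => c) false)
        []

def solution_alt (source : String) : String := String.mk (pvBlist source.toList)

-- ===== PRECONDITION & SPEC =====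
def Spec_solution (source : String) (out : String) : Prop := out = solution_alt source
instance (source : String) (out : String) : Decidable (Spec_solution source out) := by unfold Spec_solution; infer_instance

-- ===== CLAIM (what is proved, stated in full; the proofs are below) =====
def Claim_equal_solution : Prop := ∀ (source : String), Dom_solution source → Spec_solution source (solution source)

-- ===== LEMMAS AND PROOFS =====

-- count of a char in the second component of the pass
theorem pvStep_foldl_snd_count (s : List Char) (rem ns : List Char) (c : Char) :
    (s.foldl pvStep (rem, ns)).2.count c
      = ns.count c + (if c ∈ rem then s.count c else s.count c - 1) := by
  induction s generalizing rem ns with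
  | nil => split_ifs <;> simp
  | cons a t ih =>
      by_cases ha : rem.contains a = true <;>
        simp only [List.foldl_cons, pvStep, ha, if_true, if_false, Bool.false_eq_true]
      · rw [ih]
        have ham : a ∈ rem := List.contains_iff_mem.mp ha
        by_cases hc : c ∈ rem <;> by_cases hac : c = a <;>
          simp_all [List.count_append, List.count_cons, List.count_singleton, beq_iff_eq, eq_comm] <;> omega
      · rw [ih]
        have ham : a ∉ rem := fun hm => ha (List.contains_iff_mem.mpr hm)
        by_cases hc : c ∈ rem <;> by_cases hac : c = a <;>
          simp_all [List.count_append, List.count_cons, List.count_singleton, List.mem_append, beq_iff_eq, eq_comm] <;> omega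

theorem pvPass_snd_count (s : List Char) (c : Char) :
    (pvPassA s).2.count c = s.count c - 1 := by
  rw [pvPassA_eq_foldl]
  have := pvStep_foldl_snd_count s [] [] c
  simpa using this

theorem pvPass_snd_mem (s : List Char) (c : Char) :
    c ∈ (pvPassA s).2 ↔ 2 ≤ s.count c := by
  rw [← List.count_pos_iff, pvPass_snd_count]
  omega

theorem pvPass_fst (s : List Char) : (pvPassA s).1 = PySem.Set.ofList s := by
  rw [pvPassA_eq_foldl, pvStep_foldl_fst, PySem.Set.update_nil_left]

-- the "level k" block: sorted distinct chars of s with count ≥ k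
def pvLvl (s : List Char) (k : Int) : List Char :=
  PySem.List.sorted ((PySem.Set.ofList s).filter (fun c => decide (k ≤ (s.count c : Int))))
    (fun c => c) false

theorem pvCounts_eq (s : List Char) : pvCounts s = PySem.Dict.counter s :=
  PySem.Dict.foldl_insert_getD_add_one_eq_counter s

theorem pvCounterValues (s : List Char) :
    (PySem.Dict.counter s).values = (PySem.Set.ofList s).map (fun c => ((s.count c : Int))) := by
  unfold PySem.Dict.values
  rw [PySem.Dict.items_counter, List.map_map]
  rfl

-- pvBlist as a flatMap of levels, with the max characterized
theorem pvBlist_eq_flatMap (s : List Char) (m : Int)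
    (hmem : ∃ c ∈ s, (s.count c : Int) = m) (hmax : ∀ c ∈ s, (s.count c : Int) ≤ m) :
    pvBlist s = (PySem.List.pyRange 1 (m + 1) 1).flatMap (pvLvl s) := by
  unfold pvBlist
  rw [pvCounts_eq]
  obtain ⟨c0, hc0, hc0m⟩ := hmem
  have hvals := pvCounterValues s
  rcases hq : PySem.List.max? (PySem.Dict.counter s).values (fun v => v) with _ | m'
  · rw [PySem.List.max?_eq_none_iff] at hq
    rw [hvals] at hq
    have : c0 ∈ PySem.Set.ofList s := (PySem.Set.mem_ofList s c0).mpr hc0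
    rw [List.map_eq_nil_iff] at hq
    simp [hq] at this
  · have h1 : m' ≤ m := by
      have hm := PySem.List.max?_mem hq
      rw [hvals] at hm
      obtain ⟨c1, hc1, hc1e⟩ := List.mem_map.mp hm
      rw [← hc1e]
      exact hmax c1 ((PySem.Set.mem_ofList s c1).mp hc1)
    have h2 : m ≤ m' := by
      have := PySem.List.max?_isMax hq ((s.count c0 : Int))
      rw [hvals] at this
      refine hc0m ▸ this (List.mem_map.mpr ⟨c0, (PySem.Set.mem_ofList s c0).mpr hc0, rfl⟩)
    have hmm : m' = m := le_antisymm h1 h2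
    subst hmm
    dsimp only []
    rw [PySem.List.foldl_append_eq_flatMap, List.nil_append]
    refine List.flatMap_congr fun k _ => ?_
    rw [PySem.Dict.items_counter, List.filter_map, List.map_map,
      show ((fun (x : Char × Int) => x.1) ∘ fun c => (c, (List.count c s : Int))) = fun c => c from rfl,
      List.map_id',
      show ((fun (p : Char × Int) => decide (k ≤ p.2)) ∘ fun c => (c, (List.count c s : Int)))
        = fun c => decide (k ≤ (List.count c s : Int)) from rfl]
    rfl

theorem pvLvl_one (s : List Char) :
    pvLvl s 1 = PySem.List.sorted (PySem.Set.ofList s) (fun c => c) false := by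
  unfold pvLvl
  congr 1
  apply List.filter_eq_self.mpr
  intro c hc
  rw [decide_eq_true_iff]
  have hm : c ∈ s := (PySem.Set.mem_ofList s c).mp hc
  have := List.count_pos_iff.mpr hm
  omega

theorem pvLvl_shift (s : List Char) (j : Int) (hj : 1 ≤ j) :
    pvLvl s (j + 1) = pvLvl (pvPassA s).2 j := by
  unfold pvLvl
  apply PySem.List.sorted_eq_sorted_of_perm _ _ _ (fun a b h => h)
  refine (List.perm_ext_iff_of_nodup (List.Nodup.filter _ (PySem.Set.nodup_ofList s))
    (List.Nodup.filter _ (PySem.Set.nodup_ofList _))).mpr ?_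
  intro c
  simp only [List.mem_filter, PySem.Set.mem_ofList, decide_eq_true_iff]
  have hcnt := pvPass_snd_count s c
  have hmem2 := pvPass_snd_mem s c
  constructor
  · rintro ⟨hcs, hk⟩
    have h2 : 2 ≤ s.count c := by omega
    exact ⟨hmem2.mpr h2, by omega⟩
  · rintro ⟨hcns, hk⟩
    have h2 : 2 ≤ s.count c := hmem2.mp hcns
    exact ⟨List.count_pos_iff.mp (by omega), by omega⟩

-- a maximal count exists for nonempty s
theorem pvMaxCount (s : List Char) (h : s ≠ []) :
    ∃ m : Int, (∃ c ∈ s, (s.count c : Int) = m) ∧ (∀ c ∈ s, (s.count c : Int) ≤ m) := by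
  rcases hq : PySem.List.max? s (fun c => (s.count c : Int)) with _ | cm
  · rw [PySem.List.max?_eq_none_iff] at hq
    exact absurd hq h
  · exact ⟨(s.count cm : Int), ⟨cm, PySem.List.max?_mem hq, rfl⟩, PySem.List.max?_isMax hq⟩

-- the key recurrence: one pass of A peels off exactly level 1 of B's output
theorem pvBlist_rec (s : List Char) (h : s ≠ []) :
    pvBlist s = PySem.List.sorted (PySem.Set.ofList s) (fun c => c) false ++ pvBlist (pvPassA s).2 := by
  obtain ⟨m, hmem, hmax⟩ := pvMaxCount s h
  have h1m : 1 ≤ m := by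
    obtain ⟨c, hc, hce⟩ := hmem
    have := List.count_pos_iff.mpr hc
    omega
  rw [pvBlist_eq_flatMap s m hmem hmax,
    PySem.List.pyRange_one_cons (by omega : (1 : Int) < m + 1), List.flatMap_cons, pvLvl_one]
  congr 1
  by_cases hne : (pvPassA s).2 = []
  · have hm1 : m = 1 := by
      obtain ⟨c, hc, hce⟩ := hmem
      have hcount := pvPass_snd_count s c
      have hzero : (pvPassA s).2.count c = 0 := by rw [hne]; simp
      have := List.count_pos_iff.mpr hc
      omega
    subst hm1
    rw [show (1 : Int) + 1 = 2 from rfl, PySem.List.pyRange_one_eq_nil (le_refl 2), hne]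
    rfl
  · have hm2 : 2 ≤ m := by
      obtain ⟨c, hcns⟩ := List.exists_mem_of_ne_nil _ hne
      have h2 := (pvPass_snd_mem s c).mp hcns
      have hle := hmax c (List.count_pos_iff.mp (by omega))
      omega
    obtain ⟨c0, hc0, hc0e⟩ := hmem
    have hc0ns : c0 ∈ (pvPassA s).2 := (pvPass_snd_mem s c0).mpr (by omega)
    have hmemns : ∃ c ∈ (pvPassA s).2, ((pvPassA s).2.count c : Int) = m - 1 :=
      ⟨c0, hc0ns, by have := pvPass_snd_count s c0; omega⟩
    have hmaxns : ∀ c ∈ (pvPassA s).2, ((pvPassA s).2.count c : Int) ≤ m - 1 := by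
      intro c hc
      have h2 := (pvPass_snd_mem s c).mp hc
      have hcnt := pvPass_snd_count s c
      have := hmax c (List.count_pos_iff.mp (by omega))
      omega
    rw [pvBlist_eq_flatMap _ (m - 1) hmemns hmaxns,
      show m - 1 + 1 = m from by ring,
      PySem.List.pyRange_one, PySem.List.pyRange_one,
      show ((m + 1 - (1 + 1)) : Int) = m - 1 from by ring,
      List.flatMap_map, List.flatMap_map]
    refine List.flatMap_congr fun k _ => ?_
    show pvLvl s (1 + 1 + (k : Int)) = pvLvl (pvPassA s).2 (1 + (k : Int))
    rw [show (1 + 1 + (k : Int)) = (1 + (k : Int)) + 1 from by ring]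
    exact pvLvl_shift s (1 + (k : Int)) (by omega)

theorem pvALoop_eq (s : List Char) (dest : List Char) :
    pvALoop s dest = dest ++ pvBlist s := by
  induction s, dest using pvALoop.induct with
  | case1 dest =>
      simp [pvALoop, show pvBlist [] = ([] : List Char) from rfl]
  | case2 s dest h st ih =>
      rw [pvALoop, dif_neg h]
      dsimp only []
      rw [ih, pvBlist_rec s h, pvPass_fst, List.append_assoc]

-- ===== VERDICT (by name: the statement is the Claim_ definition above) =====
theorem solution_spec : Claim_equal_solution := by
  intro source _
  unfold Spec_solution solution solution_alt
  rw [pvALoop_eq, List.nil_append]
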